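-- pv_equiv track=rewrite | github.com/grufghr/advent | advent2023/day02/puzzle.py | max_stats
-- ===== SOURCE A (Python) =====
-- def max_stats(game_stats):
--     game_max = {}
--     for game_num, game in game_stats.items():
--         dict1 = {}
--         for dict2 in game:
--             for key in dict2:
--                 if key not in dict1 or dict2[key] > dict1[key]:
--                     dict1[key] = dict2[key]
--         game_max[game_num] = dict1
--     return game_max
-- ===== SOURCE B (Python) =====
-- def max_stats(game_stats):
--     game_max = {}
--     for game_num, game in game_stats.items():
--         groups = {}
--         for d in game:
--             for key, value in d.items():
--                 groups.setdefault(key, []).append(value)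
--         game_max[game_num] = {key: max(values) for key, values in groups.items()}
--     return game_max
-- ===== Notes on version B (the rewrite author's own statement) =====
-- stated objective: alternative
-- what changed: B replaces A's single-pass running-max dict with an explicit two-phase per-game computation: first group every value into a per-key list (setdefault/append), then reduce each list with max() in a dict comprehension.
import Mathlib
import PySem

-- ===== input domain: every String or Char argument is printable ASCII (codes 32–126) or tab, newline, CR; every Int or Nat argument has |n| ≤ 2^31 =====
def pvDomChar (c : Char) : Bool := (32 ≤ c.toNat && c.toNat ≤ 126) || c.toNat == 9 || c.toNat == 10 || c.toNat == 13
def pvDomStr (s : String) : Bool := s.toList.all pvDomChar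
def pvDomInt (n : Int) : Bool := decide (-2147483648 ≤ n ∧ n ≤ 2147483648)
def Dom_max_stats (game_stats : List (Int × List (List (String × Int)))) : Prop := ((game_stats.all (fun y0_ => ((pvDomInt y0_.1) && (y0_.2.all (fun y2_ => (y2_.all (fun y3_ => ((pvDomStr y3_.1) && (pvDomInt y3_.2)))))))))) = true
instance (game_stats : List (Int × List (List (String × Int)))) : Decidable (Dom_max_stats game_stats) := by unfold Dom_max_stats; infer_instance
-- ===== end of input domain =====

-- B groups all values per key first and then reduces each list with max(); A keeps a running max. Alternative decomposition, same cost.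

-- ===== PORT A =====
-- A's inner per-game dict: running strict-greater max, iterating each dict2's keys.
def maxStatsGameA (game : List (List (String × Int))) : PySem.Dict String Int :=
  game.foldl (fun dict1 d2l =>
      let d2 := PySem.Dict.ofList d2l
      d2.keys.foldl (fun d1 key =>
          if !(d1.contains key) || d2.getD key 0 > d1.getD key 0 then
            d1.insert key (d2.getD key 0)
          else d1) dict1)
    PySem.Dict.empty

def max_stats (game_stats : List (Int × List (List (String × Int)))) : List (Int × List (String × Int)) :=
  (game_stats.foldl (fun game_max p => game_max.insert p.1 (maxStatsGameA p.2).items)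
    (PySem.Dict.empty : PySem.Dict Int (List (String × Int)))).items

-- ===== PORT B =====
-- max(values), values nonempty in every use
def pymaxInt (vs : List Int) : Int :=
  match PySem.List.max? vs (fun y => y) with
  | some m => m
  | none => 0

def maxStatsGameB (game : List (List (String × Int))) : PySem.Dict String Int :=
  let groups : PySem.Dict String (List Int) :=
    game.foldl (fun g d2l =>
        (PySem.Dict.ofList d2l).items.foldl (fun g kv => g.modify kv.1 [] (· ++ [kv.2])) g)
      PySem.Dict.empty
  PySem.Dict.ofList (groups.items.map (fun q => (q.1, pymaxInt q.2)))

def max_stats_alt (game_stats : List (Int × List (List (String × Int)))) : List (Int × List (String × Int)) :=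
  (game_stats.foldl (fun game_max p => game_max.insert p.1 (maxStatsGameB p.2).items)
    (PySem.Dict.empty : PySem.Dict Int (List (String × Int)))).items

-- ===== PRECONDITION & SPEC =====
def Spec_max_stats (game_stats : List (Int × List (List (String × Int)))) (out : List (Int × List (String × Int))) : Prop := out = max_stats_alt game_stats
instance (game_stats : List (Int × List (List (String × Int)))) (out : List (Int × List (String × Int))) : Decidable (Spec_max_stats game_stats out) := by unfold Spec_max_stats; infer_instance

-- ===== CLAIM (what is proved, stated in full; the proofs are below) =====
def Claim_equal_max_stats : Prop := ∀ (game_stats : List (Int × List (List (String × Int)))), Dom_max_stats game_stats → Spec_max_stats game_stats (max_stats game_stats)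

-- ===== LEMMAS AND PROOFS =====

-- A's per-pair running-max step and B's per-pair grouping step
def runA (d : PySem.Dict String Int) (p : String × Int) : PySem.Dict String Int :=
  if !(d.contains p.1) || p.2 > d.getD p.1 0 then d.insert p.1 p.2 else d

def runB (g : PySem.Dict String (List Int)) (p : String × Int) : PySem.Dict String (List Int) :=
  g.modify p.1 [] (· ++ [p.2])

def flatPairs (game : List (List (String × Int))) : List (String × Int) :=
  (game.map (fun d2l => (PySem.Dict.ofList d2l).items)).flatten

theorem pymaxInt_append (vs : List Int) (v : Int) (h : vs ≠ []) :
    pymaxInt (vs ++ [v]) = if v > pymaxInt vs then v else pymaxInt vs := by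
  obtain ⟨x, t, rfl⟩ : ∃ x t, vs = x :: t := by
    cases vs with
    | nil => exact absurd rfl h
    | cons x t => exact ⟨x, t, rfl⟩
  simp only [pymaxInt, List.cons_append, PySem.List.max?_id_cons, List.foldl_append, List.foldl]
  rcases max_cases (List.foldl max x t) v with ⟨h1, h2⟩ | ⟨h1, h2⟩ <;> rw [h1] <;> split <;> omega

theorem a_flat (game : List (List (String × Int))) :
    maxStatsGameA game = (flatPairs game).foldl runA PySem.Dict.empty := by
  unfold maxStatsGameA flatPairs
  rw [List.foldl_flatten, List.foldl_map]
  have : (fun (d : PySem.Dict String Int) (d2l : List (String × Int)) =>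
      let d2 := PySem.Dict.ofList d2l
      d2.keys.foldl (fun d1 key =>
          if !(d1.contains key) || d2.getD key 0 > d1.getD key 0 then
            d1.insert key (d2.getD key 0)
          else d1) d) =
      (fun d d2l => ((PySem.Dict.ofList d2l).items).foldl runA d) := by
    funext d d2l
    rw [PySem.Dict.items_eq_map_keys (PySem.Dict.ofList d2l) (PySem.Dict.nodup_keys_ofList d2l) 0,
      List.foldl_map]
    rfl
  rw [this]

def InvAB (d : PySem.Dict String Int) (g : PySem.Dict String (List Int)) : Prop :=
  d.keys = g.keys ∧ g.keys.Nodup ∧ (∀ k, d.getD k 0 = pymaxInt (g.getD k [])) ∧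
    (∀ k, g.contains k = true → g.getD k [] ≠ [])

theorem inv_step (d : PySem.Dict String Int) (g : PySem.Dict String (List Int))
    (p : String × Int) (h : InvAB d g) : InvAB (runA d p) (runB g p) := by
  obtain ⟨hk, hnd, hv, hne⟩ := h
  obtain ⟨k, v⟩ := p
  have hc : d.contains k = g.contains k := by
    rw [PySem.Dict.contains_eq_decide_mem_keys, PySem.Dict.contains_eq_decide_mem_keys, hk]
  by_cases hgc : g.contains k = true
  · -- key already present
    have hdc : d.contains k = true := by rw [hc]; exact hgc
    have hBkeys : (runB g (k, v)).keys = g.keys := by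
      rw [runB, PySem.Dict.keys_modify, PySem.Dict.keys_insert_of_contains _ _ hgc]
    have hAkeys : (runA d (k, v)).keys = d.keys := by
      rw [runA]; split
      · exact PySem.Dict.keys_insert_of_contains _ _ hdc
      · rfl
    refine ⟨by rw [hAkeys, hBkeys, hk], by rw [hBkeys]; exact hnd, ?_, ?_⟩
    · intro j
      have hBg : (runB g (k, v)).getD j [] =
          if j = k then g.getD k [] ++ [v] else g.getD j [] := PySem.Dict.getD_modify g k j [] _
      by_cases hjk : j = k
      · subst hjk
        rw [hBg, if_pos rfl]
        rw [pymaxInt_append _ _ (hne _ hgc), ← hv j]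
        rw [runA]; simp only [hdc, Bool.not_true, Bool.false_or]
        split
        next hgt =>
          rw [PySem.Dict.getD_insert, if_pos rfl, if_pos (of_decide_eq_true hgt)]
        next hgt =>
          rw [if_neg (by simpa using hgt)]
      · rw [hBg, if_neg hjk, ← hv j, runA]
        split
        · rw [PySem.Dict.getD_insert, if_neg hjk]
        · rfl
    · intro j hj
      have hBg : (runB g (k, v)).getD j [] =
          if j = k then g.getD k [] ++ [v] else g.getD j [] := PySem.Dict.getD_modify g k j [] _
      rw [hBg]
      by_cases hjk : j = k
      · simp [hjk]
      · rw [if_neg hjk]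
        apply hne
        rw [runB, PySem.Dict.contains_modify] at hj
        simpa [hjk] using hj
  · -- fresh key
    have hgc' : g.contains k = false := by
      cases hG : g.contains k
      · rfl
      · exact absurd hG hgc
    have hdc : d.contains k = false := by rw [hc]; exact hgc'
    have hA : runA d (k, v) = d.insert k v := by
      rw [runA]; simp [hdc]
    have hBkeys : (runB g (k, v)).keys = g.keys ++ [k] := by
      rw [runB, PySem.Dict.keys_modify, PySem.Dict.keys_insert_of_not_contains _ _ hgc']
    have hknot : k ∉ g.keys := by
      have := PySem.Dict.contains_eq_decide_mem_keys g k
      rw [hgc'] at this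
      exact of_decide_eq_false this.symm
    refine ⟨?_, ?_, ?_, ?_⟩
    · rw [hA, PySem.Dict.keys_insert_of_not_contains _ _ hdc, hBkeys, hk]
    · rw [hBkeys]
      simp only [List.nodup_append, hnd, List.nodup_singleton, List.mem_singleton, true_and]
      intro a ha b hb
      subst hb
      exact fun h => hknot (h ▸ ha)
    · intro j
      have hBg : (runB g (k, v)).getD j [] =
          if j = k then g.getD k [] ++ [v] else g.getD j [] := PySem.Dict.getD_modify g k j [] _
      rw [hA, PySem.Dict.getD_insert, hBg]
      by_cases hjk : j = k
      · subst hjk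
        rw [if_pos rfl, if_pos rfl, PySem.Dict.getD_of_not_contains _ _ hgc']
        rfl
      · rw [if_neg hjk, if_neg hjk]; exact hv j
    · intro j hj
      have hBg : (runB g (k, v)).getD j [] =
          if j = k then g.getD k [] ++ [v] else g.getD j [] := PySem.Dict.getD_modify g k j [] _
      rw [hBg]
      by_cases hjk : j = k
      · simp [hjk]
      · rw [if_neg hjk]
        apply hne
        rw [runB, PySem.Dict.contains_modify] at hj
        simpa [hjk] using hj

theorem inv_foldl (L : List (String × Int)) :
    ∀ d g, InvAB d g → InvAB (L.foldl runA d) (L.foldl runB g) := by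
  induction L with
  | nil => intro d g h; exact h
  | cons p t ih => intro d g h; exact ih _ _ (inv_step d g p h)

theorem b_groups_flat (game : List (List (String × Int))) :
    (game.foldl (fun g d2l =>
        (PySem.Dict.ofList d2l).items.foldl (fun g kv => g.modify kv.1 [] (· ++ [kv.2])) g)
      (PySem.Dict.empty : PySem.Dict String (List Int))) =
    (flatPairs game).foldl runB PySem.Dict.empty := by
  rw [flatPairs, List.foldl_flatten, List.foldl_map]
  rfl

theorem inv_empty : InvAB PySem.Dict.empty PySem.Dict.empty := by
  refine ⟨rfl, List.nodup_nil, fun k => ?_, fun k h => ?_⟩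
  · rw [PySem.Dict.getD_empty, PySem.Dict.getD_empty]; rfl
  · rw [PySem.Dict.contains_empty] at h; exact absurd h (by simp)

theorem per_game_eq (game : List (List (String × Int))) :
    maxStatsGameA game = maxStatsGameB game := by
  rw [a_flat]
  unfold maxStatsGameB
  rw [b_groups_flat]
  have inv := inv_foldl (flatPairs game) PySem.Dict.empty PySem.Dict.empty inv_empty
  set d := (flatPairs game).foldl runA PySem.Dict.empty with hd
  set g := (flatPairs game).foldl runB PySem.Dict.empty with hg
  obtain ⟨hk, hnd, hv, _⟩ := inv
  apply PySem.Dict.ext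
  have hgitems : g.items = g.keys.map (fun k => (k, g.getD k [])) :=
    PySem.Dict.items_eq_map_keys g hnd []
  have hmapfst : (g.items.map (fun q => (q.1, pymaxInt q.2))).map Prod.fst = g.keys := by
    simp only [List.map_map]
    simp [PySem.Dict.keys, Function.comp]
  have hrhs : (PySem.Dict.ofList (g.items.map (fun q => (q.1, pymaxInt q.2)))).items =
      g.items.map (fun q => (q.1, pymaxInt q.2)) := by
    have := PySem.Dict.items_foldl_insert_fresh (g.items.map (fun q => (q.1, pymaxInt q.2)))
      Prod.fst Prod.snd PySem.Dict.empty
      (fun a _ => PySem.Dict.contains_empty a.1)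
      (by rw [hmapfst]; exact hnd)
    simpa using this
  rw [hrhs, PySem.Dict.items_eq_map_keys d (hk ▸ hnd) 0, hk, hgitems, List.map_map]
  apply List.map_congr_left
  intro k _
  simp only [Function.comp]
  rw [hv k]

-- ===== VERDICT (by name: the statement is the Claim_ definition above) =====
theorem max_stats_spec : Claim_equal_max_stats := by
  intro gs _
  unfold Spec_max_stats max_stats max_stats_alt
  have : (fun (game_max : PySem.Dict Int (List (String × Int))) (p : Int × List (List (String × Int))) => game_max.insert p.1 (maxStatsGameA p.2).items) = (fun game_max p => game_max.insert p.1 (maxStatsGameB p.2).items) := by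
    funext gm p; rw [per_game_eq]
  rw [this]
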